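-- pv_equiv track=rewrite | github.com/va2ai/bvaapi2 | app.py | _min_inter_keyword_dist
-- ===== SOURCE A (Python) =====
-- def _min_inter_keyword_dist(positions):
--     """Min distance between positions of different keywords."""
--     if len(set(kw for _, kw in positions)) < 2:
--         return -1
--     min_d = float('inf')
--     for i, (p1, k1) in enumerate(positions):
--         for p2, k2 in positions[i+1:]:
--             if k1 != k2:
--                 min_d = min(min_d, abs(p2 - p1))
--     return int(min_d)
-- ===== SOURCE B (Python) =====
-- def _min_inter_keyword_dist(positions):
--     """Min distance between positions of different keywords."""
--     sp = sorted(positions, key=lambda t: t[0])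
--     best = None
--     for (p1, k1), (p2, k2) in zip(sp, sp[1:]):
--         if k1 != k2:
--             d = p2 - p1
--             if best is None or d < best:
--                 best = d
--     return -1 if best is None else best
-- ===== Notes on version B (the rewrite author's own statement) =====
-- stated objective: faster
-- what changed: Replaces the all-pairs double loop by sort-by-position and a single scan of adjacent sorted pairs with different keywords (the closest differing pair is always bracketed by an adjacent differing pair), with best=None replacing the distinct-keyword-set guard.
import Mathlib
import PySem

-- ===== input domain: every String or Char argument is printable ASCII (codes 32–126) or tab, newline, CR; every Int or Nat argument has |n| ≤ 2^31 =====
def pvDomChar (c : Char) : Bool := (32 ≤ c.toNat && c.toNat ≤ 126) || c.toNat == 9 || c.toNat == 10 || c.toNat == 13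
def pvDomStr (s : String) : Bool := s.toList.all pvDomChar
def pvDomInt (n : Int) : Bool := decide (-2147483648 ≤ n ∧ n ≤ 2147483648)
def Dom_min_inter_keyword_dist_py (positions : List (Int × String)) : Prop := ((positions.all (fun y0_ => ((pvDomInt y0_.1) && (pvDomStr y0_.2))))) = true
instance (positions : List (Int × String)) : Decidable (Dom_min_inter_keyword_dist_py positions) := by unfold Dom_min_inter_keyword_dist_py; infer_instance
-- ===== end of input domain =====

-- B replaces the all-pairs O(n^2) scan by sort-by-position + one adjacent-pair scan (O(n log n)).

-- ===== PORT A =====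
-- min(min_d, abs(..)) where min_d starts at float('inf'): none models inf.
def pyOptMin (acc : Option Int) (v : Int) : Option Int :=
  match acc with
  | none => some v
  | some m => some (min m v)

def min_inter_keyword_dist_py (positions : List (Int × String)) : Int :=
  if (PySem.Set.ofList (positions.map (fun pk => pk.2))).length < 2 then -1
  else
    -- int(min_d): under the guard some differing pair exists, so min_d = some _ here
    ((PySem.List.enumerate positions).foldl
        (fun acc ix =>
          (PySem.List.slice positions (some (ix.1 + 1)) none).foldl
            (fun acc2 pk2 => if ix.2.2 ≠ pk2.2 then pyOptMin acc2 |pk2.1 - ix.2.1| else acc2)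
            acc)
        none).getD 0

-- ===== PORT B =====
def min_inter_keyword_dist_py_alt (positions : List (Int × String)) : Int :=
  match
    ((PySem.List.sorted positions (fun t => t.1)).zip
        (PySem.List.slice (PySem.List.sorted positions (fun t => t.1)) (some 1) none)).foldl
      (fun best ab =>
        if ab.1.2 ≠ ab.2.2 then
          let d := ab.2.1 - ab.1.1
          match best with
          | none => some d
          | some m => if d < m then some d else some m
        else best)
      none
  with
  | none => -1
  | some d => d

-- ===== PRECONDITION & SPEC =====
def Spec_min_inter_keyword_dist_py (positions : List (Int × String)) (out : Int) : Prop := out = min_inter_keyword_dist_py_alt positions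
instance (positions : List (Int × String)) (out : Int) : Decidable (Spec_min_inter_keyword_dist_py positions out) := by unfold Spec_min_inter_keyword_dist_py; infer_instance

-- ===== CLAIM (what is proved, stated in full; the proofs are below) =====
def Claim_equal_min_inter_keyword_dist_py : Prop := ∀ (positions : List (Int × String)), Dom_min_inter_keyword_dist_py positions → Spec_min_inter_keyword_dist_py positions (min_inter_keyword_dist_py positions)

-- ===== LEMMAS AND PROOFS =====

-- all |p2 - p1| over ordered pairs with different keywords (A's candidate distances)
def candA : List (Int × String) → List Int
  | [] => []
  | x :: xs =>
      ((xs.filter (fun y => x.2 ≠ y.2)).map (fun y => |y.1 - x.1|)) ++ candA xs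

-- adjacent-pair candidate distances (B's candidates) over a list
def adjCand (l : List (Int × String)) : List Int :=
  ((l.zip l.tail).filter (fun ab => ab.1.2 ≠ ab.2.2)).map (fun ab => ab.2.1 - ab.1.1)

theorem foldl_pyOptMin_some (xs : List Int) : ∀ (m : Int), xs.foldl pyOptMin (some m) = some (xs.foldl min m) := by
  induction xs with
  | nil => intro m; rfl
  | cons a t ih => intro m; simpa [pyOptMin] using ih (min m a)

theorem foldl_pyOptMin_cons (c : Int) (cs : List Int) : (c :: cs).foldl pyOptMin none = some (cs.foldl min c) := by
  simpa [pyOptMin] using foldl_pyOptMin_some cs c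


-- [a,b] adjacent in l is a two-element sublist of l
theorem zip_adj_sublist {α : Type} : ∀ (l : List α) (a b : α), (a,b) ∈ l.zip l.tail → List.Sublist [a,b] l := by
  intro l
  induction l with
  | nil => intro a b h; simp at h
  | cons x xs ih =>
    intro a b h
    cases xs with
    | nil => simp at h
    | cons y t =>
      simp only [List.tail_cons, List.zip_cons_cons, List.mem_cons] at h
      rcases h with h | h
      · obtain ⟨rfl, rfl⟩ := Prod.mk.injEq .. ▸ h
        exact List.Sublist.cons₂ a (List.Sublist.cons₂ b (List.nil_sublist t))
      · exact List.Sublist.cons x (ih a b h)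

-- adjacency pairs of l are adjacency pairs of x :: l
theorem zip_tail_cons_subset {α : Type} (x : α) (l : List α) :
    ∀ ab, ab ∈ l.zip l.tail → ab ∈ (x :: l).zip (x :: l).tail := by
  intro ab h
  cases l with
  | nil => simp at h
  | cons y t =>
    simp only [List.tail_cons, List.zip_cons_cons, List.mem_cons]
    exact Or.inr h

theorem mem_adjCand_iff (l : List (Int × String)) (e : Int) :
    e ∈ adjCand l ↔ ∃ ab, ab ∈ l.zip l.tail ∧ ab.1.2 ≠ ab.2.2 ∧ e = ab.2.1 - ab.1.1 := by
  constructor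
  · intro h
    simp only [adjCand, List.mem_map, List.mem_filter, decide_eq_true_eq] at h
    obtain ⟨ab, ⟨hmem, hne⟩, hval⟩ := h
    exact ⟨ab, hmem, hne, hval.symm⟩
  · rintro ⟨ab, hmem, hne, rfl⟩
    simp only [adjCand, List.mem_map, List.mem_filter, decide_eq_true_eq]
    exact ⟨ab, ⟨hmem, hne⟩, rfl⟩

theorem mem_adjCand_cons (x : Int × String) (l : List (Int × String)) (e : Int)
    (h : e ∈ adjCand l) : e ∈ adjCand (x :: l) := by
  rw [mem_adjCand_iff] at h ⊢
  obtain ⟨ab, hmem, hne, hval⟩ := h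
  exact ⟨ab, zip_tail_cons_subset x l ab hmem, hne, hval⟩

theorem mem_candA_iff (e : Int) : ∀ (l : List (Int × String)),
    (e ∈ candA l ↔ ∃ x y, List.Sublist [x,y] l ∧ x.2 ≠ y.2 ∧ e = |y.1 - x.1|) := by
  intro l
  induction l with
  | nil =>
    simp only [candA, List.not_mem_nil, false_iff]
    rintro ⟨x, y, hsub, -, -⟩
    exact absurd (hsub.length_le) (by simp)
  | cons z zs ih =>
    constructor
    · intro h
      simp only [candA, List.mem_append, List.mem_map, List.mem_filter, decide_eq_true_eq] at h
      rcases h with ⟨y, ⟨hy, hne⟩, hval⟩ | h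
      · exact ⟨z, y, List.Sublist.cons₂ z (List.singleton_sublist.mpr hy), hne, hval.symm⟩
      · obtain ⟨x, y, hsub, hne, hval⟩ := ih.mp h
        exact ⟨x, y, List.Sublist.cons z hsub, hne, hval⟩
    · rintro ⟨x, y, hsub, hne, rfl⟩
      simp only [candA, List.mem_append, List.mem_map, List.mem_filter, decide_eq_true_eq]
      cases hsub with
      | cons _ h => exact Or.inr (ih.mpr ⟨x, y, h, hne, rfl⟩)
      | cons₂ _ h => exact Or.inl ⟨y, ⟨List.singleton_sublist.mp h, hne⟩, rfl⟩

theorem pair_sublist_of_mem {α : Type} [DecidableEq α] {x y : α} : ∀ {l : List α},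
    x ∈ l → y ∈ l → x ≠ y → List.Sublist [x,y] l ∨ List.Sublist [y,x] l := by
  intro l
  induction l with
  | nil => intro hx; simp at hx
  | cons z zs ih =>
    intro hx hy hne
    by_cases hxz : x = z
    · subst hxz
      have hy' : y ∈ zs := by
        rcases List.mem_cons.mp hy with h | h
        · exact absurd h.symm hne
        · exact h
      exact Or.inl (List.Sublist.cons₂ x (List.singleton_sublist.mpr hy'))
    · by_cases hyz : y = z
      · subst hyz
        have hx' : x ∈ zs := by
          rcases List.mem_cons.mp hx with h | h
          · exact absurd h hxz
          · exact h
        exact Or.inr (List.Sublist.cons₂ y (List.singleton_sublist.mpr hx'))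
      · have hx' : x ∈ zs := by
          rcases List.mem_cons.mp hx with h | h
          · exact absurd h hxz
          · exact h
        have hy' : y ∈ zs := by
          rcases List.mem_cons.mp hy with h | h
          · exact absurd h hyz
          · exact h
        rcases ih hx' hy' hne with h | h
        · exact Or.inl (List.Sublist.cons z h)
        · exact Or.inr (List.Sublist.cons z h)

-- in a position-sorted list, any differing sublist pair is bracketed by an adjacent differing pair at most as far apart
theorem chain_adj : ∀ (l : List (Int × String)), l.Pairwise (fun a b => a.1 ≤ b.1) →
    ∀ u v : Int × String, List.Sublist [u,v] l → u.2 ≠ v.2 → ∃ e ∈ adjCand l, e ≤ v.1 - u.1 := by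
  intro l
  induction l with
  | nil =>
    intro _ u v hsub
    exact absurd (hsub.length_le) (by simp)
  | cons z rest ih =>
    intro hpw u v hsub hne
    have hz : ∀ w ∈ rest, z.1 ≤ w.1 := (List.pairwise_cons.mp hpw).1
    have hpw' : rest.Pairwise (fun a b => a.1 ≤ b.1) := (List.pairwise_cons.mp hpw).2
    cases hsub with
    | cons _ h =>
      obtain ⟨e, hmem, hle⟩ := ih hpw' u v h hne
      exact ⟨e, mem_adjCand_cons z rest e hmem, hle⟩
    | cons₂ _ h =>
      -- u = z, [v] <+ rest
      have hv : v ∈ rest := List.singleton_sublist.mp h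
      cases rest with
      | nil => simp at hv
      | cons w t =>
        by_cases hzw : z.2 ≠ w.2
        · refine ⟨w.1 - z.1, ?_, ?_⟩
          · rw [mem_adjCand_iff]
            refine ⟨(z, w), ?_, hzw, rfl⟩
            simp [List.zip_cons_cons]
          · have hwv : w.1 ≤ v.1 := by
              rcases List.mem_cons.mp hv with h' | h'
              · exact le_of_eq (by rw [h'])
              · exact (List.pairwise_cons.mp hpw').1 v h'
            omega
        · push Not at hzw
          have hwv : w.2 ≠ v.2 := by rw [← hzw]; exact hne
          have hvt : v ∈ t := by
            rcases List.mem_cons.mp hv with h' | h'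
            · exact (hwv (by rw [h'])).elim
            · exact h'
          have hsub' : List.Sublist [w, v] (w :: t) :=
            List.Sublist.cons₂ w (List.singleton_sublist.mpr hvt)
          obtain ⟨e, hmem, hle⟩ := ih hpw' w v hsub' hwv
          refine ⟨e, mem_adjCand_cons z (w :: t) e hmem, ?_⟩
          have := hz w (by simp)
          omega

theorem adjCand_subset_candA (l₀ l : List (Int × String))
    (hpw : l.Pairwise (fun a b => a.1 ≤ b.1)) (hperm : l.Perm l₀) :
    ∀ e ∈ adjCand l, e ∈ candA l₀ := by
  intro e he
  obtain ⟨ab, hmem, hne, rfl⟩ := (mem_adjCand_iff l e).mp he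
  have hsub : List.Sublist [ab.1, ab.2] l := zip_adj_sublist l ab.1 ab.2 (by simpa using hmem)
  have hle : ab.1.1 ≤ ab.2.1 := by
    have := List.Pairwise.sublist hsub hpw
    exact (List.pairwise_cons.mp this).1 ab.2 (by simp)
  have hne' : ab.1 ≠ ab.2 := fun h => hne (by rw [h])
  have h1 : ab.1 ∈ l₀ := hperm.mem_iff.mp (hsub.subset (by simp))
  have h2 : ab.2 ∈ l₀ := hperm.mem_iff.mp (hsub.subset (by simp))
  rcases pair_sublist_of_mem h1 h2 hne' with h | h
  · exact (mem_candA_iff _ l₀).mpr ⟨ab.1, ab.2, h, hne, (abs_of_nonneg (by omega)).symm⟩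
  · exact (mem_candA_iff _ l₀).mpr ⟨ab.2, ab.1, h, fun hh => hne hh.symm,
      by rw [abs_sub_comm]; exact (abs_of_nonneg (by omega)).symm⟩

theorem candA_dominated (l₀ l : List (Int × String))
    (hpw : l.Pairwise (fun a b => a.1 ≤ b.1)) (hperm : l.Perm l₀) :
    ∀ d ∈ candA l₀, ∃ e ∈ adjCand l, e ≤ d := by
  intro d hd
  obtain ⟨x, y, hsub, hne, rfl⟩ := (mem_candA_iff d l₀).mp hd
  have hx : x ∈ l := hperm.mem_iff.mpr (hsub.subset (by simp))
  have hy : y ∈ l := hperm.mem_iff.mpr (hsub.subset (by simp))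
  have hxy : x ≠ y := fun h => hne (by rw [h])
  rcases pair_sublist_of_mem hx hy hxy with h | h
  · obtain ⟨e, hmem, hle⟩ := chain_adj l hpw x y h hne
    have hxy1 : x.1 ≤ y.1 := by
      have := List.Pairwise.sublist h hpw
      exact (List.pairwise_cons.mp this).1 y (by simp)
    have habs : |y.1 - x.1| = y.1 - x.1 := abs_of_nonneg (by omega)
    exact ⟨e, hmem, by omega⟩
  · obtain ⟨e, hmem, hle⟩ := chain_adj l hpw y x h (fun hh => hne hh.symm)
    have hxy1 : y.1 ≤ x.1 := by
      have := List.Pairwise.sublist h hpw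
      exact (List.pairwise_cons.mp this).1 x (by simp)
    have habs : |y.1 - x.1| = x.1 - y.1 := by
      rw [abs_sub_comm]; exact abs_of_nonneg (by omega)
    exact ⟨e, hmem, by omega⟩

-- a list with two distinct members has length ≥ 2
theorem two_le_length_of_mem_ne {α : Type} {a b : α} : ∀ {l : List α}, a ∈ l → b ∈ l → a ≠ b → 2 ≤ l.length := by
  intro l hx hy hne
  match l with
  | [] => simp at hx
  | [z] =>
    simp only [List.mem_singleton] at hx hy
    exact absurd (hx.trans hy.symm) hne
  | _ :: _ :: _ => simp [List.length_cons]

-- A's guard is exactly emptiness of the candidate-distance list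
theorem guard_iff (l : List (Int × String)) :
    (PySem.Set.ofList (l.map (fun pk => pk.2))).length < 2 ↔ candA l = [] := by
  constructor
  · intro h
    by_contra hne
    obtain ⟨d, hd⟩ := List.exists_mem_of_ne_nil _ hne
    obtain ⟨x, y, hsub, hxy, -⟩ := (mem_candA_iff d l).mp hd
    have hx : x ∈ l := hsub.subset (by simp)
    have hy : y ∈ l := hsub.subset (by simp)
    have h1 : x.2 ∈ PySem.Set.ofList (l.map (fun pk => pk.2)) :=
      (PySem.Set.mem_ofList _ _).mpr (List.mem_map.mpr ⟨x, hx, rfl⟩)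
    have h2 : y.2 ∈ PySem.Set.ofList (l.map (fun pk => pk.2)) :=
      (PySem.Set.mem_ofList _ _).mpr (List.mem_map.mpr ⟨y, hy, rfl⟩)
    have := two_le_length_of_mem_ne h1 h2 hxy
    omega
  · intro h
    by_contra hlt
    push Not at hlt
    obtain ⟨a, b, t, hs⟩ : ∃ a b t, PySem.Set.ofList (l.map (fun pk => pk.2)) = a :: b :: t := by
      match hm : PySem.Set.ofList (l.map (fun pk => pk.2)) with
      | [] => rw [hm] at hlt; simp at hlt
      | [z] => rw [hm] at hlt; simp at hlt
      | a :: b :: t => exact ⟨a, b, t, hm⟩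
    have hnd := PySem.Set.nodup_ofList (l.map (fun pk => pk.2))
    rw [hs] at hnd
    have hab : a ≠ b := fun hh => (List.nodup_cons.mp hnd).1 (hh ▸ List.mem_cons_self ..)
    have ha : a ∈ l.map (fun pk => pk.2) := by
      have : a ∈ PySem.Set.ofList (l.map (fun pk => pk.2)) := by rw [hs]; simp
      exact (PySem.Set.mem_ofList _ _).mp this
    have hb : b ∈ l.map (fun pk => pk.2) := by
      have : b ∈ PySem.Set.ofList (l.map (fun pk => pk.2)) := by rw [hs]; simp
      exact (PySem.Set.mem_ofList _ _).mp this
    obtain ⟨px, hpx, rfl⟩ := List.mem_map.mp ha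
    obtain ⟨py, hpy, rfl⟩ := List.mem_map.mp hb
    have hne : px ≠ py := fun hh => hab (by rw [hh])
    rcases pair_sublist_of_mem hpx hpy hne with hsub | hsub
    · have : |py.1 - px.1| ∈ candA l := (mem_candA_iff _ l).mpr ⟨px, py, hsub, hab, rfl⟩
      rw [h] at this; simp at this
    · have : |px.1 - py.1| ∈ candA l :=
        (mem_candA_iff _ l).mpr ⟨py, px, hsub, fun hh => hab hh.symm, rfl⟩
      rw [h] at this; simp at this

-- A's double loop is the fold of pyOptMin over candA
theorem inner_fold_eq (x : Int × String) (xs : List (Int × String)) (acc : Option Int) :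
    xs.foldl (fun a y => if x.2 ≠ y.2 then pyOptMin a |y.1 - x.1| else a) acc
      = ((xs.filter (fun y => x.2 ≠ y.2)).map (fun y => |y.1 - x.1|)).foldl pyOptMin acc := by
  rw [List.foldl_map, PySem.List.foldl_ite_eq_foldl_filter]

theorem A_fold_eq (full : List (Int × String)) :
    ∀ (l : List (Int × String)) (k : Nat) (acc : Option Int), full.drop k = l →
    (PySem.List.enumerate l (k : Int)).foldl
        (fun acc ix =>
          (PySem.List.slice full (some (ix.1 + 1)) none).foldl
            (fun acc2 pk2 => if ix.2.2 ≠ pk2.2 then pyOptMin acc2 |pk2.1 - ix.2.1| else acc2)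
            acc) acc
      = (candA l).foldl pyOptMin acc := by
  intro l
  induction l with
  | nil => intro k acc h; simp [PySem.List.enumerate_nil, candA]
  | cons x xs ih =>
    intro k acc h
    have hdrop : full.drop (k+1) = xs := by
      rw [← List.tail_drop, h]; rfl
    have hcast : ((k:Int)+1) = ((k+1 : Nat) : Int) := by push_cast; ring
    have hslice : PySem.List.slice full (some ((k:Int)+1)) none = xs := by
      rw [hcast, PySem.List.slice_from full (by positivity)]
      simpa using hdrop
    rw [PySem.List.enumerate_cons, List.foldl_cons]
    simp only []
    rw [hslice, hcast, ih (k+1) _ hdrop,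
        show candA (x :: xs)
          = ((xs.filter (fun y => x.2 ≠ y.2)).map (fun y => |y.1 - x.1|)) ++ candA xs from rfl,
        List.foldl_append, ← inner_fold_eq]

-- B's loop is the fold of pyOptMin over adjCand
theorem B_fold_eq (sp : List (Int × String)) :
    (sp.zip (PySem.List.slice sp (some 1) none)).foldl
        (fun best ab =>
          if ab.1.2 ≠ ab.2.2 then
            let d := ab.2.1 - ab.1.1
            match best with
            | none => some d
            | some m => if d < m then some d else some m
          else best) none
      = (adjCand sp).foldl pyOptMin none := by
  have hstep : (fun (best : Option Int) (ab : (Int × String) × (Int × String)) =>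
        if ab.1.2 ≠ ab.2.2 then
          let d := ab.2.1 - ab.1.1
          match best with
          | none => some d
          | some m => if d < m then some d else some m
        else best)
      = (fun best ab => if ab.1.2 ≠ ab.2.2 then pyOptMin best (ab.2.1 - ab.1.1) else best) := by
    funext best ab
    cases best with
    | none => rfl
    | some m =>
      simp only [pyOptMin]
      by_cases hc : ab.1.2 ≠ ab.2.2
      · simp only [if_pos hc, Int.min_def]
        split_ifs <;> simp <;> omega
      · simp [hc]
  rw [hstep, PySem.List.slice_from_one, adjCand, List.foldl_map,
      PySem.List.foldl_ite_eq_foldl_filter]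

-- ===== VERDICT (by name: the statement is the Claim_ definition above) =====
theorem min_inter_keyword_dist_py_spec : Claim_equal_min_inter_keyword_dist_py := by
  intro positions _
  unfold Spec_min_inter_keyword_dist_py min_inter_keyword_dist_py min_inter_keyword_dist_py_alt
  have hperm : (PySem.List.sorted positions (fun t => t.1)).Perm positions :=
    PySem.List.sorted_perm ..
  have hpw : (PySem.List.sorted positions (fun t => t.1)).Pairwise (fun a b => a.1 ≤ b.1) :=
    PySem.List.sorted_pairwise ..
  have hA := A_fold_eq positions positions 0 none (by simp)
  simp only [Nat.cast_zero] at hA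
  rw [B_fold_eq, hA]
  by_cases hg : (PySem.Set.ofList (positions.map (fun pk => pk.2))).length < 2
  · rw [if_pos hg]
    have hcand : candA positions = [] := (guard_iff positions).mp hg
    have hadj : adjCand (PySem.List.sorted positions (fun t => t.1)) = [] := by
      cases hadj : adjCand (PySem.List.sorted positions (fun t => t.1)) with
      | nil => rfl
      | cons e es =>
        have : e ∈ candA positions :=
          adjCand_subset_candA positions _ hpw hperm e (by rw [hadj]; simp)
        rw [hcand] at this; simp at this
    rw [hadj]
    rfl
  · rw [if_neg hg]
    have hAne : candA positions ≠ [] := fun hh => hg ((guard_iff positions).mpr hh)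
    obtain ⟨c, cs, hc⟩ : ∃ c cs, candA positions = c :: cs := by
      cases h : candA positions with
      | nil => exact absurd h hAne
      | cons c cs => exact ⟨c, cs, rfl⟩
    have hBne : adjCand (PySem.List.sorted positions (fun t => t.1)) ≠ [] := by
      intro hh
      obtain ⟨e, hmem, -⟩ := candA_dominated positions _ hpw hperm c (by rw [hc]; simp)
      rw [hh] at hmem; simp at hmem
    obtain ⟨e, es, he⟩ : ∃ e es, adjCand (PySem.List.sorted positions (fun t => t.1)) = e :: es := by
      cases h : adjCand (PySem.List.sorted positions (fun t => t.1)) with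
      | nil => exact absurd h hBne
      | cons e es => exact ⟨e, es, rfl⟩
    rw [hc, he, foldl_pyOptMin_cons, foldl_pyOptMin_cons]
    -- both sides reduce to the two minima; show they are equal
    have hAmem : cs.foldl min c ∈ candA positions := by
      rw [hc]
      rcases PySem.List.foldl_min_mem cs c with h | h
      · rw [h]; simp
      · simp [h]
    have hAmin : ∀ v ∈ candA positions, cs.foldl min c ≤ v := by
      intro v hv
      rw [hc] at hv
      rcases List.mem_cons.mp hv with h | h
      · rw [h]; exact (PySem.List.foldl_min_le cs c).1
      · exact (PySem.List.foldl_min_le cs c).2 v h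
    have hBmem : es.foldl min e ∈ adjCand (PySem.List.sorted positions (fun t => t.1)) := by
      rw [he]
      rcases PySem.List.foldl_min_mem es e with h | h
      · rw [h]; simp
      · simp [h]
    have hBmin : ∀ v ∈ adjCand (PySem.List.sorted positions (fun t => t.1)), es.foldl min e ≤ v := by
      intro v hv
      rw [he] at hv
      rcases List.mem_cons.mp hv with h | h
      · rw [h]; exact (PySem.List.foldl_min_le es e).1
      · exact (PySem.List.foldl_min_le es e).2 v h
    have h1 : cs.foldl min c ≤ es.foldl min e :=
      hAmin _ (adjCand_subset_candA positions _ hpw hperm _ hBmem)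
    have h2 : es.foldl min e ≤ cs.foldl min c := by
      obtain ⟨e', hmem, hle⟩ := candA_dominated positions _ hpw hperm _ hAmem
      exact le_trans (hBmin e' hmem) hle
    have : cs.foldl min c = es.foldl min e := le_antisymm h1 h2
    simp [this]
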